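-- pv_equiv track=rewrite | github.com/TM-Simeon/projects | quiz/db.py | cal_position
-- ===== SOURCE A (Python) =====
-- def cal_position(scores):
-- 	positions = []
-- 	position_json = {}
--
-- 	position = 1
-- 	prev_score = None
--
-- 	# Calculate positions
-- 	for score in scores:
-- 	    if score != prev_score:
-- 	        # Assign a new position if the score is different from the previous one
-- 	        position_json[score] = position
--
-- 	    position += 1
-- 	    prev_score = score
--
--
-- 	return position_json
-- ===== SOURCE B (Python) =====
-- def cal_position(scores):
--     positions = {}
--     i = 0
--     n = len(scores)
--     while i < n:
--         s = scores[i]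
--         j = i + 1
--         while j < n and scores[j] == s:
--             j += 1
--         positions[s] = i + 1
--         i = j
--     return positions
-- ===== Notes on version B (the rewrite author's own statement) =====
-- stated objective: alternative
-- what changed: B iterates over maximal runs of equal scores with an index-skipping inner scan, assigning each run its start position, instead of A's per-element loop carrying position and prev_score state.
import Mathlib
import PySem

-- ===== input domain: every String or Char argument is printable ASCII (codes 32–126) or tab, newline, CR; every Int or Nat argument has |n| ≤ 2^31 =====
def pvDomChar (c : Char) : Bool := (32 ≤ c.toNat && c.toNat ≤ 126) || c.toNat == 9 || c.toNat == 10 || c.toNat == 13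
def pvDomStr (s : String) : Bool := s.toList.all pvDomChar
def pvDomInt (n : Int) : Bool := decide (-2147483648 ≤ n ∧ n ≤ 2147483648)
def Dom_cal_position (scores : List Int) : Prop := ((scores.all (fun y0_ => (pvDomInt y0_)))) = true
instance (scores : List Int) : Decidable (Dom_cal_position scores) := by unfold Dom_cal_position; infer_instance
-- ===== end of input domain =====

-- B replaces A's per-element loop with prev_score/position state by an index loop over maximal
-- runs of equal scores (alternative decomposition, same cost); return-value equivalence proved.

-- ===== PORT A =====
-- one iteration of A's for-loop; state = (position_json, position, prev_score)
def calStep (st : PySem.Dict Int Int × Int × Option Int) (score : Int) :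
    PySem.Dict Int Int × Int × Option Int :=
  let d := if st.2.2 ≠ some score then st.1.insert score st.2.1 else st.1
  (d, st.2.1 + 1, some score)

def cal_position (scores : List Int) : List (Int × Int) :=
  ((scores.foldl calStep (PySem.Dict.empty, 1, none)).1).items

-- ===== PORT B =====
-- inner while loop: first index j ≥ start with scores[j] ≠ s (or the length)
def findRunEnd (scores : List Int) (s : Int) (j : Nat) : Nat :=
  if h : j < scores.length then
    if scores[j] = s then findRunEnd scores s (j + 1) else j
  else j
termination_by scores.length - j

-- needed by altLoop's termination; cited in its decreasing_by
theorem findRunEnd_ge (scores : List Int) (s : Int) (j : Nat) : j ≤ findRunEnd scores s j := by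
  rw [findRunEnd]
  split_ifs with h1 h2
  · exact Nat.le_trans (Nat.le_succ j) (findRunEnd_ge scores s (j + 1))
  · exact Nat.le_refl j
  · exact Nat.le_refl j
termination_by scores.length - j

-- outer while loop of B
def altLoop (scores : List Int) (i : Nat) (d : PySem.Dict Int Int) : PySem.Dict Int Int :=
  if h : i < scores.length then
    altLoop scores (findRunEnd scores scores[i] (i + 1)) (d.insert scores[i] ((i : Int) + 1))
  else d
termination_by scores.length - i
decreasing_by
  have := findRunEnd_ge scores scores[i] (i + 1)
  omega

def cal_position_alt (scores : List Int) : List (Int × Int) :=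
  (altLoop scores 0 PySem.Dict.empty).items

-- ===== PRECONDITION & SPEC =====
def Spec_cal_position (scores : List Int) (out : List (Int × Int)) : Prop := out = cal_position_alt scores
instance (scores : List Int) (out : List (Int × Int)) : Decidable (Spec_cal_position scores out) := by unfold Spec_cal_position; infer_instance

-- ===== CLAIM (what is proved, stated in full; the proofs are below) =====
def Claim_equal_cal_position : Prop := ∀ (scores : List Int), Dom_cal_position scores → Spec_cal_position scores (cal_position scores)

-- ===== LEMMAS AND PROOFS =====

-- folding A's step over a block of elements all equal to the current prev_score changes nothing but the position
theorem foldl_calStep_run (s : Int) (l : List Int) (hall : ∀ x ∈ l, x = s) :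
    ∀ (d : PySem.Dict Int Int) (pos : Int),
    l.foldl calStep (d, pos, some s) = (d, pos + l.length, some s) := by
  induction l with
  | nil => intro d pos; simp [List.foldl]
  | cons x xs ih =>
    intro d pos
    have hx : x = s := hall x (List.mem_cons_self)
    have step : calStep (d, pos, some s) x = (d, pos + 1, some s) := by
      subst hx; simp [calStep]
    rw [List.foldl_cons, step, ih (fun y hy => hall y (List.mem_cons_of_mem x hy))]
    simp only [List.length_cons, Prod.mk.injEq, and_true, true_and]
    push_cast; ring

-- findRunEnd computes start + length of the run of s at the start of scores.drop start
theorem findRunEnd_eq (scores : List Int) (s : Int) (j : Nat) :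
    findRunEnd scores s j = j + ((scores.drop j).takeWhile (fun x => x == s)).length := by
  rw [findRunEnd]
  split_ifs with h1 h2
  · rw [findRunEnd_eq scores s (j + 1)]
    rw [List.drop_eq_getElem_cons h1]
    simp [h2]
    omega
  · rw [List.drop_eq_getElem_cons h1]
    simp [h2]
  · rw [List.drop_of_length_le (by omega)]
    simp
termination_by scores.length - j

-- main invariant: A's remaining fold from a run boundary equals B's loop from that index
theorem main_inv (scores : List Int) (i : Nat) (d : PySem.Dict Int Int) (prev : Option Int)
    (hprev : ∀ s, (scores.drop i).head? = some s → prev ≠ some s) :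
    ((scores.drop i).foldl calStep (d, (i : Int) + 1, prev)).1 = altLoop scores i d := by
  rw [altLoop]
  split_ifs with h
  · set s := scores[i] with hs
    have hdrop : scores.drop i = s :: scores.drop (i + 1) := List.drop_eq_getElem_cons h
    set rest := scores.drop (i + 1) with hrest
    have hp : prev ≠ some s := hprev s (by rw [hdrop]; rfl)
    have step1 : calStep (d, (i : Int) + 1, prev) s
        = (d.insert s ((i : Int) + 1), (i : Int) + 1 + 1, some s) := by
      simp [calStep, hp]
    set tw := rest.takeWhile (fun x => x == s) with htw
    set dw := rest.dropWhile (fun x => x == s) with hdw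
    have hsplit : rest = tw ++ dw := (List.takeWhile_append_dropWhile).symm
    have hall : ∀ x ∈ tw, x = s := by
      intro x hx
      simpa using List.mem_takeWhile_imp hx
    set j := findRunEnd scores s (i + 1) with hj
    have hjeq : j = i + 1 + tw.length := by rw [hj, findRunEnd_eq]
    have hige := findRunEnd_ge scores s (i + 1)
    have hdwdrop : scores.drop j = dw := by
      rw [hjeq, ← List.drop_drop, ← hrest, hsplit, List.drop_left]
    have hrun := foldl_calStep_run s tw hall (d.insert s ((i : Int) + 1)) ((i : Int) + 1 + 1)
    have hprev' : ∀ t, (scores.drop j).head? = some t → (some s : Option Int) ≠ some t := by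
      intro t ht hc
      have hts : t = s := by injection hc with hc'; omega
      rw [hdwdrop] at ht
      have hnot := List.head?_dropWhile_not (fun x => x == s) rest
      rw [← hdw, ht] at hnot
      simp at hnot
      exact hnot hts
    have IH := main_inv scores j (d.insert s ((i : Int) + 1)) (some s) hprev'
    rw [hdrop, List.foldl_cons, step1, hsplit, List.foldl_append, hrun]
    have harith : (i : Int) + 1 + 1 + (tw.length : Int) = (j : Int) + 1 := by
      rw [hjeq]; push_cast; ring
    rw [harith, ← hdwdrop, IH]
  · rw [List.drop_of_length_le (by omega)]
    simp [List.foldl]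
termination_by scores.length - i
decreasing_by
  have := findRunEnd_ge scores scores[i] (i + 1)
  omega

-- ===== VERDICT (by name: the statement is the Claim_ definition above) =====
theorem cal_position_spec : Claim_equal_cal_position := by
  intro scores _
  unfold Spec_cal_position cal_position cal_position_alt
  have := main_inv scores 0 PySem.Dict.empty none (by intro s _ hc; simp at hc)
  simp at this
  rw [← this]
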